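-- pv_equiv track=rewrite | github.com/S-A-I-V/CodeForcesProblem | sharkandcrucians.py | max_crucians
-- ===== SOURCE A (Python) =====
-- def max_crucians(n, m, k, teeth):
--     rows = {}
--
--     for i in range(n):
--         row_index, viability = teeth[i]
--         if row_index not in rows:
--             rows[row_index] = []
--         rows[row_index].append(viability)
--
--     max_crucians_per_row = [min(rows[row]) for row in rows]
--     total_crucians = sum(max_crucians_per_row)
--
--     return min(total_crucians, k)
-- ===== SOURCE B (Python) =====
-- def max_crucians(n, m, k, teeth):
--     pending = [teeth[i] for i in range(n)]
--     total = 0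
--     while pending:
--         r = pending[0][0]
--         total += min(v for rr, v in pending if rr == r)
--         pending = [(rr, v) for rr, v in pending if rr != r]
--     return min(total, k)
-- ===== Notes on version B (the rewrite author's own statement) =====
-- stated objective: alternative
-- what changed: A groups viabilities into per-row lists in a dict, then takes the min of each list in a comprehension and sums; B uses no dict at all: it repeatedly takes the row of the first remaining tooth, adds that row's minimum found by a direct scan, and filters that whole row out of the worklist until it is empty.
import Mathlib
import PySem

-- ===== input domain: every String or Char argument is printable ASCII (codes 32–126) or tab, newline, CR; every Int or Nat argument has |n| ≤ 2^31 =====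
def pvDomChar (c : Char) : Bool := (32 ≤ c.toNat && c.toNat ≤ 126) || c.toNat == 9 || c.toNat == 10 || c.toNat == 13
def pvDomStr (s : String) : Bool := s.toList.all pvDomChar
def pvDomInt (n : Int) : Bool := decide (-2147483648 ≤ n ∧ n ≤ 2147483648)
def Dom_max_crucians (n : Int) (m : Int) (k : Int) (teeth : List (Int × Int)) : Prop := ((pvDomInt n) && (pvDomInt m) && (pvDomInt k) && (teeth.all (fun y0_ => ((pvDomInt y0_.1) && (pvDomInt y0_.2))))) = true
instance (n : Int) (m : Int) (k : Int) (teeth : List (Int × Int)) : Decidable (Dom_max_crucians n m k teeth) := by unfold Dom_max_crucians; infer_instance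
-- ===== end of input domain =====

-- B replaces A's dict-of-lists / min-comprehension / sum pipeline by a dict-free worklist that repeatedly sums the first remaining row's minimum and filters that row out (objective: alternative; no speed claim).


-- ===== PORT A =====
-- Python's min(l) on a list of ints (l nonempty wherever either program evaluates it)
def pyMinInt (l : List Int) : Int := (PySem.List.min? l (fun v => v)).getD 0

def max_crucians (n : Int) (m : Int) (k : Int) (teeth : List (Int × Int)) : Int :=
  let rows : PySem.Dict Int (List Int) :=
    (PySem.List.pyRange 0 n 1).foldl
      (fun d i =>
        match PySem.List.pyGet? teeth i with
        | none => d   -- teeth[i] raises IndexError in Python: excluded by Pre_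
        | some rv =>
          let d' := if d.contains rv.1 then d else d.insert rv.1 []
          d'.modify rv.1 [] (fun l => l ++ [rv.2]))
      PySem.Dict.empty
  let maxPerRow := rows.keys.map (fun r => pyMinInt (rows.getD r []))
  let total := maxPerRow.sum
  min total k

-- ===== PORT B =====
-- the while loop of B: consume the worklist row group by row group
def bLoop (total : Int) (pending : List (Int × Int)) : Int :=
  match pending with
  | [] => total
  | (r, v) :: rest =>
    let mn := pyMinInt ((((r, v) :: rest).filter (fun p => p.1 == r)).map (fun p => p.2))
    bLoop (total + mn) (((r, v) :: rest).filter (fun p => (p.1 == r) = false))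
termination_by pending.length
decreasing_by
  simp only [List.filter_cons, beq_self_eq_true, List.length_cons]
  exact Nat.lt_succ_of_le (List.length_filter_le _ _)

def max_crucians_alt (n : Int) (m : Int) (k : Int) (teeth : List (Int × Int)) : Int :=
  let pending :=
    (PySem.List.pyRange 0 n 1).foldl
      (fun acc i =>
        match PySem.List.pyGet? teeth i with
        | none => acc   -- teeth[i] raises IndexError in Python: excluded by Pre_
        | some rv => acc ++ [rv]) []
  min (bLoop 0 pending) k

-- ===== PRECONDITION & SPEC =====
-- Pre_ excludes exactly n > len(teeth), where both A and B raise IndexError on teeth[i].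
def Pre_max_crucians (n : Int) (m : Int) (k : Int) (teeth : List (Int × Int)) : Prop :=
  n ≤ teeth.length
instance (n : Int) (m : Int) (k : Int) (teeth : List (Int × Int)) : Decidable (Pre_max_crucians n m k teeth) := by unfold Pre_max_crucians; infer_instance

def pvWitness_max_crucians : Int × Int × Int × (List (Int × Int)) := (2, 3, 5, [(1, 2), (1, 4)])

def Spec_max_crucians (n : Int) (m : Int) (k : Int) (teeth : List (Int × Int)) (out : Int) : Prop := out = max_crucians_alt n m k teeth
instance (n : Int) (m : Int) (k : Int) (teeth : List (Int × Int)) (out : Int) : Decidable (Spec_max_crucians n m k teeth out) := by unfold Spec_max_crucians; infer_instance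

-- ===== CLAIM (what is proved, stated in full; the proofs are below) =====
def Claim_equal_max_crucians : Prop := ∀ (n : Int) (m : Int) (k : Int) (teeth : List (Int × Int)), Dom_max_crucians n m k teeth → Pre_max_crucians n m k teeth → Spec_max_crucians n m k teeth (max_crucians n m k teeth)

-- ===== LEMMAS AND PROOFS =====

-- row r's minimum viability in a worklist
def minv (l : List (Int × Int)) (r : Int) : Int :=
  pyMinInt ((l.filter (fun p => p.1 == r)).map (fun p => p.2))

-- A's loop body (guarded empty-list insert, then append) is exactly a Dict.modify
theorem stepA_eq_modify (d : PySem.Dict Int (List Int)) (rv : Int × Int) :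
    (let d' := if d.contains rv.1 then d else d.insert rv.1 []
     d'.modify rv.1 [] (fun l => l ++ [rv.2])) = d.modify rv.1 [] (fun l => l ++ [rv.2]) := by
  by_cases h : d.contains rv.1
  · simp [h]
  · simp only [h, Bool.false_eq_true, if_false]
    simp only [PySem.Dict.modify, PySem.Dict.getD_insert_self, PySem.Dict.insert_insert_self]
    rw [PySem.Dict.getD_of_not_contains d [] (by simpa using h)]

-- the index loop over range(j) is the fold over the first j teeth (shared by both ports)
theorem foldl_range_get (xs : List (Int × Int)) {β : Type} (g : β → (Int × Int) → β) :
    ∀ (j : Nat), j ≤ xs.length → ∀ (d0 : β),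
    (PySem.List.pyRange 0 (j : Int) 1).foldl
      (fun d i => match PySem.List.pyGet? xs i with
        | none => d
        | some rv => g d rv) d0
    = (xs.take j).foldl g d0 := by
  intro j
  induction j with
  | zero => intro _ d0; simp [PySem.List.pyRange_one_eq_nil]
  | succ j ih =>
    intro hj d0
    have hj' : j ≤ xs.length := Nat.le_of_succ_le hj
    have hcast : ((j + 1 : Nat) : Int) = (j : Int) + 1 := by push_cast; ring
    have hg : xs[j]? = some (xs[j]'(by omega)) := List.getElem?_eq_getElem (by omega)
    have htake : xs.take (j + 1) = xs.take j ++ [xs[j]'(by omega)] := by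
      rw [List.take_add_one, hg]; rfl
    rw [hcast, PySem.List.pyRange_one_succ_right (by positivity), List.foldl_append,
      ih hj' d0, htake, List.foldl_append]
    simp [PySem.List.pyGet?_natCast, hg]

theorem foldl_append_singleton (l : List (Int × Int)) :
    ∀ acc : List (Int × Int), l.foldl (fun a x => a ++ [x]) acc = acc ++ l := by
  induction l with
  | nil => intro acc; simp
  | cons x t ih => intro acc; simp [List.foldl_cons, ih]

-- minv only looks at the elements of the matching row
theorem minv_filter_ne (l : List (Int × Int)) (r c : Int) (hne : c ≠ r) :
    minv (l.filter (fun p => (p.1 == r) = false)) c = minv l c := by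
  unfold minv
  rw [List.filter_filter]
  congr 2
  exact List.filter_congr (fun p _ => by by_cases h : p.1 = c <;> simp [h, hne])

-- the distinct rows of the filtered worklist are the old ones minus r
theorem toFinset_filter_ne (l : List (Int × Int)) (r : Int) :
    ((l.filter (fun p => (p.1 == r) = false)).map Prod.fst).toFinset
      = ((l.map Prod.fst).toFinset).erase r := by
  ext c
  simp only [List.mem_toFinset, List.mem_map, List.mem_filter, Finset.mem_erase]
  constructor
  · rintro ⟨p, ⟨hp, hf⟩, rfl⟩
    exact ⟨by simpa using hf, ⟨p, hp, rfl⟩⟩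
  · rintro ⟨hc, p, hp, rfl⟩
    exact ⟨p, ⟨hp, by simpa using hc⟩, rfl⟩

-- B's loop equals the sum of per-row minima over the distinct rows
theorem bLoop_eq_sum (l : List (Int × Int)) :
    ∀ t : Int, bLoop t l = t + ∑ r ∈ (l.map Prod.fst).toFinset, minv l r := by
  induction hL : l.length using Nat.strong_induction_on generalizing l with
  | _ N ih =>
    intro t
    match l with
    | [] => simp [bLoop]
    | (r, v) :: rest =>
      rw [bLoop]
      set l := (r, v) :: rest with hl
      set l' := l.filter (fun p => (p.1 == r) = false) with hl'
      have hlen : l'.length < N := by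
        rw [← hL, hl', hl]
        simp only [List.filter_cons, beq_self_eq_true, List.length_cons]
        exact Nat.lt_succ_of_le (List.length_filter_le _ _)
      have hrec := ih l'.length hlen l' rfl (t + minv l r)
      have e : pyMinInt ((l.filter (fun p => p.1 == r)).map (fun p => p.2)) = minv l r := rfl
      rw [e, hrec]
      have hfin : (l.map Prod.fst).toFinset = insert r ((l'.map Prod.fst).toFinset) := by
        rw [hl', toFinset_filter_ne]
        have hr : r ∈ (l.map Prod.fst).toFinset := by simp [hl]
        ext c
        by_cases hc : c = r <;> simp [hc, hr]
      have hnot : r ∉ (l'.map Prod.fst).toFinset := by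
        rw [hl', toFinset_filter_ne]; exact Finset.notMem_erase _ _
      rw [hfin, Finset.sum_insert hnot]
      have hcong : ∑ c ∈ (l'.map Prod.fst).toFinset, minv l c
          = ∑ c ∈ (l'.map Prod.fst).toFinset, minv l' c := by
        refine Finset.sum_congr rfl (fun c hc => ?_)
        have hcr : c ≠ r := fun h => hnot (h ▸ hc)
        rw [hl']; exact (minv_filter_ne l r c hcr).symm
      rw [← hcong]; ring

-- sum of f over a Nodup list of keys is the Finset sum over its elements
theorem sum_map_nodup (ks : List Int) (hnd : ks.Nodup) (f : Int → Int) :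
    (ks.map f).sum = ∑ x ∈ ks.toFinset, f x := by
  rw [List.sum_toFinset f hnd]

theorem toFinset_ofList (xs : List Int) : (PySem.Set.ofList xs).toFinset = xs.toFinset := by
  ext x; simp [PySem.Set.mem_ofList]

-- ===== VERDICT (by name: the statement is the Claim_ definition above) =====
theorem max_crucians_spec : Claim_equal_max_crucians := by
  intro n m k teeth _ hpre
  have hlen : n ≤ (teeth.length : Int) := hpre
  show max_crucians n m k teeth = max_crucians_alt n m k teeth
  by_cases hn0 : 0 ≤ n
  · have hn : ((n.toNat : Nat) : Int) = n := Int.toNat_of_nonneg hn0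
    simp only [max_crucians, max_crucians_alt]
    rw [← hn]
    rw [foldl_range_get teeth _ n.toNat (by omega) PySem.Dict.empty,
        foldl_range_get teeth _ n.toNat (by omega) []]
    set l := teeth.take n.toNat with hl
    rw [foldl_append_singleton l [], List.nil_append]
    have hfun : (fun (d : PySem.Dict Int (List Int)) (rv : Int × Int) =>
          let d' := if d.contains rv.1 then d else d.insert rv.1 []
          d'.modify rv.1 [] (fun l => l ++ [rv.2]))
        = fun d rv => d.modify rv.1 [] (fun w => w ++ [rv.2]) :=
      funext fun d => funext fun rv => stepA_eq_modify d rv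
    rw [hfun]
    set rowsA := l.foldl (fun d rv => d.modify rv.1 [] (fun w => w ++ [rv.2])) PySem.Dict.empty with hR
    have hkeysA : rowsA.keys = PySem.Set.ofList (l.map Prod.fst) := by
      rw [hR]
      simpa [PySem.Dict.keys_empty, PySem.Set.update_nil_left] using
        PySem.Dict.keys_foldl_modify_key l Prod.fst [] (fun _ x w => w ++ [x.2]) PySem.Dict.empty
    have hnodupA : rowsA.keys.Nodup := by rw [hkeysA]; exact PySem.Set.nodup_ofList _
    have hgetD : ∀ r : Int, pyMinInt (rowsA.getD r []) = minv l r := by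
      intro r
      have : rowsA.getD r [] = (l.filter (fun p => p.1 == r)).map (fun p => p.2) := by
        rw [hR]; simpa using PySem.Dict.getD_foldl_modify_append l PySem.Dict.empty r
      rw [this]; rfl
    rw [List.map_congr_left (fun r _ => hgetD r),
      sum_map_nodup rowsA.keys hnodupA (minv l), hkeysA, toFinset_ofList,
      bLoop_eq_sum l 0, zero_add]
  · -- n < 0: range(n) is empty in both programs
    have hnil : PySem.List.pyRange 0 n 1 = [] := PySem.List.pyRange_one_eq_nil (by omega)
    simp [max_crucians, max_crucians_alt, hnil, bLoop]
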